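-- pv_equiv track=rewrite | github.com/KelpTechnologies/truss-annotation-intelligent-function-layer | services/automated-annotation/structured_logger.py | detect_resource_type_from_path
-- ===== SOURCE A (Python) =====
-- from typing import Optional, Dict, Any
--
-- RESOURCE_TYPE_MAP = {
--     "/products": "product",
--     "/prices": "product",
--     "/analytics": "product",
--     "/listings": "listing",
--     "/discounts": "product",
--     "/forecasts": "product",
--     "/brands": "brand",
--     "/accounts": "account",
--     "/knowledge": "knowledge",
--     "/images": "image",
--     "/automations/annotation": "annotation",
--     "/automations/pricing": "pricing",
-- }
--
-- SORTED_RESOURCE_PREFIXES = sorted(RESOURCE_TYPE_MAP.keys(), key=len, reverse=True)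
--
-- def detect_resource_type_from_path(path: str) -> Optional[str]:
--     """Detect resource type from URL path prefix."""
--     if not path:
--         return None
--     normalized = path if path.startswith("/") else f"/{path}"
--     for prefix in SORTED_RESOURCE_PREFIXES:
--         if normalized.startswith(prefix) and (len(normalized) == len(prefix) or normalized[len(prefix)] == "/"):
--             return RESOURCE_TYPE_MAP[prefix]
--     return None
-- ===== SOURCE B (Python) =====
-- from typing import Optional
--
-- RESOURCE_TYPE_MAP = {
--     "/products": "product",
--     "/prices": "product",
--     "/analytics": "product",
--     "/listings": "listing",
--     "/discounts": "product",
--     "/forecasts": "product",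
--     "/brands": "brand",
--     "/accounts": "account",
--     "/knowledge": "knowledge",
--     "/images": "image",
--     "/automations/annotation": "annotation",
--     "/automations/pricing": "pricing",
-- }
--
-- def detect_resource_type_from_path(path: str) -> Optional[str]:
--     """Detect resource type from URL path prefix (direct key lookup on the leading segments)."""
--     if not path:
--         return None
--     normalized = path if path.startswith("/") else f"/{path}"
--     segs = normalized.split("/")  # segs[0] == "" since normalized starts with "/"
--     if len(segs) >= 3:
--         hit = RESOURCE_TYPE_MAP.get("/" + segs[1] + "/" + segs[2])
--         if hit is not None:
--             return hit
--     return RESOURCE_TYPE_MAP.get("/" + segs[1])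
-- ===== Notes on version B (the rewrite author's own statement) =====
-- stated objective: simpler
-- what changed: Instead of scanning all length-sorted prefixes and testing each with startswith plus a boundary check, B splits the normalized path on '/' and does at most two direct dictionary lookups on the keys built from its first one or two segments.
import Mathlib
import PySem

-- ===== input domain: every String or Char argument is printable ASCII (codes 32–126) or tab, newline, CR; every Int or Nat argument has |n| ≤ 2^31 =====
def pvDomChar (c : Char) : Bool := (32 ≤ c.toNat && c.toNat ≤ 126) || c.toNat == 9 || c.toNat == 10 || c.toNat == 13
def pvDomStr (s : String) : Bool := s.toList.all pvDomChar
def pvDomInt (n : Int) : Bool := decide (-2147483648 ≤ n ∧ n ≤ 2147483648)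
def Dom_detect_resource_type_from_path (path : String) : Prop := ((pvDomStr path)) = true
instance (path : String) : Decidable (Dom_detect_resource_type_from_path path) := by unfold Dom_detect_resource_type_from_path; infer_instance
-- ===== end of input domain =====

-- B replaces A's scan over all length-sorted prefixes by direct dictionary lookups on the two
-- candidate keys built from the path's own leading segments (objective: simpler/alternative).

-- ===== PORT A =====
-- RESOURCE_TYPE_MAP (module constant, used by both ports)
def pvResourceMap : PySem.Dict String String := PySem.Dict.ofList
  [("/products", "product"), ("/prices", "product"), ("/analytics", "product"),
   ("/listings", "listing"), ("/discounts", "product"), ("/forecasts", "product"),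
   ("/brands", "brand"), ("/accounts", "account"), ("/knowledge", "knowledge"),
   ("/images", "image"), ("/automations/annotation", "annotation"), ("/automations/pricing", "pricing")]

def pvSortedPrefixes : List String :=
  PySem.List.sorted (PySem.Dict.keys pvResourceMap) (fun p => PySem.Str.len p) true

def pvDetectLoop (normalized : String) : List String → Option String
  | [] => none
  | p :: rest =>
    if PySem.Str.startswith normalized p = true ∧
        (PySem.Str.len normalized = PySem.Str.len p ∨
          PySem.Str.pyGet? normalized (PySem.Str.len p) = some '/') then
      PySem.Dict.get? pvResourceMap p
    else pvDetectLoop normalized rest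

def detect_resource_type_from_path (path : String) : Option String :=
  if path = "" then none
  else
    let normalized := if PySem.Str.startswith path "/" then path
                      else PySem.Str.join "" ["/", path]
    pvDetectLoop normalized pvSortedPrefixes

-- ===== PORT B =====
def detect_resource_type_from_path_alt (path : String) : Option String :=
  if path = "" then none
  else
    let normalized := if PySem.Str.startswith path "/" then path
                      else PySem.Str.join "" ["/", path]
    let segs : List String := (PySem.Chars.splitOn normalized.toList ['/']).map String.ofList
    let s1 := segs.getD 1 ""
    let hit := if 3 ≤ segs.length then
        PySem.Dict.get? pvResourceMap (PySem.Str.join "" ["/", s1, "/", segs.getD 2 ""])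
      else none
    match hit with
    | some r => some r
    | none => PySem.Dict.get? pvResourceMap (PySem.Str.join "" ["/", s1])

-- ===== PRECONDITION & SPEC =====
def Spec_detect_resource_type_from_path (path : String) (out : Option String) : Prop := out = detect_resource_type_from_path_alt path
instance (path : String) (out : Option String) : Decidable (Spec_detect_resource_type_from_path path out) := by unfold Spec_detect_resource_type_from_path; infer_instance

-- ===== CLAIM (what is proved, stated in full; the proofs are below) =====
def Claim_equal_detect_resource_type_from_path : Prop := ∀ (path : String), Dom_detect_resource_type_from_path path → Spec_detect_resource_type_from_path path (detect_resource_type_from_path path)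

-- ===== LEMMAS AND PROOFS =====

def pvSeg (l : List Char) : List Char := l.takeWhile (fun c => c != '/')
def pvAfter (l : List Char) : List Char := (l.dropWhile (fun c => c != '/')).tail

theorem pvSeg_no_slash (l : List Char) : '/' ∉ pvSeg l := by
  intro h
  have := List.mem_takeWhile_imp h
  simp at this

theorem pvDrop_mem (l : List Char) (h : '/' ∈ l) : '/' ∈ l.dropWhile (fun c => c != '/') := by
  have ht := List.takeWhile_append_dropWhile (p := fun c => c != '/') (l := l)
  rw [← ht] at h
  rcases List.mem_append.mp h with h1 | h1
  · exact absurd h1 (pvSeg_no_slash l)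
  · exact h1

def pvSplit (l : List Char) : List (List Char) :=
  if _h : '/' ∈ l then pvSeg l :: pvSplit (pvAfter l) else [l]
termination_by l.length
decreasing_by
  have h1 := pvDrop_mem l _h
  have h2 : l.dropWhile (fun c => c != '/') ≠ [] := by
    intro e; rw [e] at h1; simp at h1
  have h3 := List.length_dropWhile_le (p := fun c => c != '/') (l := l)
  have h4 : (l.dropWhile (fun c => c != '/')).length ≠ 0 := by
    simpa using h2
  simp [pvAfter]
  omega

theorem pvTakeWhile_clean (a b : List Char) (ha : '/' ∉ a) :
    (a ++ '/' :: b).takeWhile (fun c => c != '/') = a := by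
  induction a with
  | nil => simp
  | cons x xs ih =>
    have hx : x ≠ '/' := by intro e; exact ha (by simp [e])
    simp only [List.cons_append, List.takeWhile_cons]
    simp [hx, ih (fun hm => ha (by simp [hm]))]

theorem pvDropWhile_clean (a b : List Char) (ha : '/' ∉ a) :
    (a ++ '/' :: b).dropWhile (fun c => c != '/') = '/' :: b := by
  induction a with
  | nil => simp
  | cons x xs ih =>
    have hx : x ≠ '/' := by intro e; exact ha (by simp [e])
    simp only [List.cons_append, List.dropWhile_cons]
    simp [hx, ih (fun hm => ha (by simp [hm]))]

theorem pvSplit_clean (a : List Char) (ha : '/' ∉ a) : pvSplit a = [a] := by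
  rw [pvSplit, dif_neg ha]

theorem pvSplit_cons (a b : List Char) (ha : '/' ∉ a) :
    pvSplit (a ++ '/' :: b) = a :: pvSplit b := by
  rw [pvSplit, dif_pos (by simp : '/' ∈ a ++ '/' :: b)]
  rw [show pvSeg (a ++ '/' :: b) = a from pvTakeWhile_clean a b ha]
  rw [show pvAfter (a ++ '/' :: b) = b by simp [pvAfter, pvDropWhile_clean a b ha]]

theorem pvGo_spec (fuel : Nat) (l cur : List Char) (acc : List (List Char))
    (hf : l.length < fuel) (hc : '/' ∉ cur) :
    PySem.Chars.splitOn.go ['/'] fuel l cur acc = acc.reverse ++ pvSplit (cur.reverse ++ l) := by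
  induction fuel generalizing l cur acc with
  | zero => omega
  | succ n ih =>
    cases l with
    | nil =>
      simp only [PySem.Chars.splitOn.go]
      rw [List.append_nil, pvSplit_clean cur.reverse (by simpa using hc)]
      simp
    | cons c rest =>
      by_cases hcs : c = '/'
      · subst hcs
        have hpre : List.isPrefixOf ['/'] ('/' :: rest) = true := by simp [List.isPrefixOf]
        simp only [PySem.Chars.splitOn.go, hpre, if_pos]
        rw [show List.drop (['/'] : List Char).length ('/' :: rest) = rest from rfl]
        rw [ih rest [] (cur.reverse :: acc) (by simpa using hf) (by simp)]
        rw [pvSplit_cons cur.reverse rest (by simpa using hc)]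
        simp
      · have hpre : List.isPrefixOf ['/'] (c :: rest) = false := by
          simp [List.isPrefixOf]; intro e; exact absurd e.symm hcs
        simp only [PySem.Chars.splitOn.go, hpre]
        rw [ih rest (c :: cur) acc (by simpa using hf) (by simp [hc, Ne.symm hcs])]
        simp

theorem pvSplitOn_eq (l : List Char) : PySem.Chars.splitOn l ['/'] = pvSplit l := by
  have := pvGo_spec (l.length + 1) l [] [] (by omega) (by simp)
  simpa [PySem.Chars.splitOn] using this

def PvCond (t w : List Char) : Prop :=
  w <+: t ∧ (t.length = w.length ∨ t[w.length]? = some '/')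

theorem pvSeg_cons (c : Char) (t : List Char) :
    pvSeg (c :: t) = if c = '/' then [] else c :: pvSeg t := by
  simp only [pvSeg, List.takeWhile_cons]
  by_cases hc : c = '/' <;> simp [hc]

theorem pvCond_one (t w : List Char) (hw : '/' ∉ w) :
    PvCond t w ↔ pvSeg t = w := by
  induction t generalizing w with
  | nil =>
    constructor
    · rintro ⟨h1, _⟩
      simpa [pvSeg] using (List.prefix_nil.mp h1).symm
    · intro h; rw [← h]; simp [pvSeg, PvCond]
  | cons c t' ih =>
    cases w with
    | nil =>
      constructor
      · rintro ⟨-, h2⟩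
        rcases h2 with h2 | h2
        · simp at h2
        · simp at h2; simp [pvSeg_cons, h2]
      · intro h
        have hc : c = '/' := by
          by_contra hc
          simp [pvSeg_cons, hc] at h
        exact ⟨by simp, Or.inr (by simp [hc])⟩
    | cons a w' =>
      have ha : a ≠ '/' := by intro e; exact hw (by simp [e])
      have hw' : '/' ∉ w' := fun hm => hw (by simp [hm])
      have hrec := ih w' hw'
      by_cases hca : c = a
      · subst hca
        constructor
        · rintro ⟨h1, h2⟩
          have h1' := (List.cons_prefix_cons.mp h1).2
          have h2' : t'.length = w'.length ∨ t'[w'.length]? = some '/' := by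
            rcases h2 with h2 | h2
            · left; simpa using h2
            · right; simpa using h2
          have hseg := hrec.mp ⟨h1', h2'⟩
          simp [pvSeg_cons, ha, hseg]
        · intro h
          simp only [pvSeg_cons, if_neg ha, List.cons.injEq, true_and] at h
          obtain ⟨h1', h2'⟩ := hrec.mpr h
          refine ⟨List.cons_prefix_cons.mpr ⟨rfl, h1'⟩, ?_⟩
          rcases h2' with h2' | h2'
          · left; simpa using h2'
          · right; simpa using h2'
      · constructor
        · rintro ⟨h1, -⟩
          exact absurd (List.cons_prefix_cons.mp h1).1 (Ne.symm hca)
        · intro h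
          exfalso
          by_cases hc : c = '/'
          · simp [pvSeg_cons, hc] at h
          · simp [pvSeg_cons, hc] at h
            exact hca h.1

theorem pvAfter_slash (t' : List Char) : pvAfter ('/' :: t') = t' := by
  simp [pvAfter]

theorem pvAfter_cons (c : Char) (t' : List Char) (hc : c ≠ '/') :
    pvAfter (c :: t') = pvAfter t' := by
  simp [pvAfter, hc]

theorem pvCond_two (t w1 w2 : List Char) (hw1 : '/' ∉ w1) :
    PvCond t (w1 ++ '/' :: w2) ↔ pvSeg t = w1 ∧ '/' ∈ t ∧ PvCond (pvAfter t) w2 := by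
  induction t generalizing w1 with
  | nil =>
    constructor
    · rintro ⟨h1, -⟩
      have := List.prefix_nil.mp h1
      simp at this
    · rintro ⟨-, h, -⟩; simp at h
  | cons c t' ih =>
    cases w1 with
    | nil =>
      simp only [List.nil_append]
      constructor
      · rintro ⟨h1, h2⟩
        obtain ⟨hc, h1'⟩ := List.cons_prefix_cons.mp h1
        subst hc
        have h2' : t'.length = w2.length ∨ t'[w2.length]? = some '/' := by
          rcases h2 with h2 | h2
          · left; simpa using h2
          · right; simpa using h2
        exact ⟨by simp [pvSeg_cons], by simp, by rw [pvAfter_slash]; exact ⟨h1', h2'⟩⟩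
      · rintro ⟨hseg, -, hc3⟩
        have hc : c = '/' := by
          by_contra hc
          simp [pvSeg_cons, hc] at hseg
        subst hc
        rw [pvAfter_slash] at hc3
        obtain ⟨h1', h2'⟩ := hc3
        refine ⟨List.cons_prefix_cons.mpr ⟨rfl, h1'⟩, ?_⟩
        rcases h2' with h2' | h2'
        · left; simpa using h2'
        · right; simpa using h2'
    | cons a w1' =>
      have ha : a ≠ '/' := by intro e; exact hw1 (by simp [e])
      have hw1' : '/' ∉ w1' := fun hm => hw1 (by simp [hm])
      have hrec := ih w1' hw1'
      by_cases hca : c = a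
      · subst hca
        constructor
        · rintro ⟨h1, h2⟩
          have h1' := (List.cons_prefix_cons.mp h1).2
          have h2' : t'.length = (w1' ++ '/' :: w2).length ∨ t'[(w1' ++ '/' :: w2).length]? = some '/' := by
            rcases h2 with h2 | h2
            · left; simpa using h2
            · right; simpa using h2
          obtain ⟨hs, hm, hcnd⟩ := hrec.mp ⟨h1', h2'⟩
          exact ⟨by simp [pvSeg_cons, ha, hs], by simp [hm],
            by rwa [pvAfter_cons _ _ ha]⟩
        · rintro ⟨hseg, hm, hc3⟩
          simp only [pvSeg_cons, if_neg ha, List.cons.injEq, true_and] at hseg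
          have hm' : '/' ∈ t' := by
            rcases List.mem_cons.mp hm with e | e
            · exact absurd e.symm ha
            · exact e
          rw [pvAfter_cons _ _ ha] at hc3
          obtain ⟨h1', h2'⟩ := hrec.mpr ⟨hseg, hm', hc3⟩
          refine ⟨List.cons_prefix_cons.mpr ⟨rfl, h1'⟩, ?_⟩
          rcases h2' with h2' | h2'
          · left; simpa using h2'
          · right; simpa using h2'
      · constructor
        · rintro ⟨h1, -⟩
          exact absurd (List.cons_prefix_cons.mp h1).1 (Ne.symm hca)
        · rintro ⟨hseg, -, -⟩
          exfalso
          by_cases hc : c = '/'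
          · simp [pvSeg_cons, hc] at hseg
          · simp [pvSeg_cons, hc] at hseg
            exact hca hseg.1

theorem pvSlashSplit (a b c d : List Char) (ha : '/' ∉ a) (hc : '/' ∉ c) :
    a ++ '/' :: b = c ++ '/' :: d ↔ a = c ∧ b = d := by
  constructor
  · intro h
    induction a generalizing c with
    | nil =>
      cases c with
      | nil => simpa using h
      | cons e c' =>
        simp only [List.nil_append, List.cons_append, List.cons.injEq] at h
        exact absurd h.1.symm (fun e' => hc (by simp [e']))
    | cons x a' ih =>
      cases c with
      | nil =>
        simp only [List.cons_append, List.nil_append, List.cons.injEq] at h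
        exact absurd h.1 (fun e' => ha (by simp [e']))
      | cons e c' =>
        simp only [List.cons_append, List.cons.injEq] at h
        obtain ⟨h1, h2⟩ := h
        obtain ⟨h3, h4⟩ := ih c' (fun hm => ha (by simp [hm])) (fun hm => hc (by simp [hm])) h2
        exact ⟨by simp [h1, h3], h4⟩
  · rintro ⟨rfl, rfl⟩; rfl

theorem pvCondA_iff (n p : String) (t w : List Char)
    (hn : n.toList = '/' :: t) (hp : p.toList = '/' :: w) :
    (PySem.Str.startswith n p = true ∧
      (PySem.Str.len n = PySem.Str.len p ∨
        PySem.Str.pyGet? n (PySem.Str.len p) = some '/')) ↔ PvCond t w := by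
  have h1 : PySem.Str.startswith n p = true ↔ w <+: t := by
    rw [PySem.Str.startswith, PySem.Chars.startswith_iff, hn, hp, List.cons_prefix_cons]
    simp
  have h2 : PySem.Str.len n = PySem.Str.len p ↔ t.length = w.length := by
    simp [PySem.Str.len_eq, hn, hp]
  have h3 : PySem.Str.pyGet? n (PySem.Str.len p) = t[w.length]? := by
    have hlp : PySem.Str.len p = ((w.length + 1 : Nat) : Int) := by
      simp [PySem.Str.len_eq, hp]
    rw [hlp, PySem.Str.pyGet?_natCast, hn]
    simp
  rw [PvCond, h1, h2, h3]

theorem pvMap_mk : pvResourceMap = PySem.Dict.mk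
  [("/products", "product"), ("/prices", "product"), ("/analytics", "product"),
   ("/listings", "listing"), ("/discounts", "product"), ("/forecasts", "product"),
   ("/brands", "brand"), ("/accounts", "account"), ("/knowledge", "knowledge"),
   ("/images", "image"), ("/automations/annotation", "annotation"), ("/automations/pricing", "pricing")] := by decide

theorem pvKeyNe1 (p : String) (w s1 : List Char) (hp : p.toList = '/' :: w) (hne : s1 ≠ w) :
    ¬ (p = String.ofList ('/' :: s1)) := by
  simp only [String.ext_iff, hp]
  simp only [String.toList_ofList, List.cons.injEq, true_and]
  intro e; exact hne e.symm

theorem pvKeyNe2 (p : String) (w1 w2 s1 : List Char) (hp : p.toList = '/' :: (w1 ++ '/' :: w2))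
    (h : '/' ∉ s1) : ¬ (p = String.ofList ('/' :: s1)) := by
  simp only [String.ext_iff, hp]
  simp only [String.toList_ofList, List.cons.injEq, true_and]
  intro e; exact h (by rw [← e]; simp)

theorem pvKeyNe3 (p : String) (w : List Char) (hp : p.toList = '/' :: w) (hw : '/' ∉ w)
    (s1 s2 : List Char) : ¬ (p = String.ofList ('/' :: (s1 ++ '/' :: s2))) := by
  simp only [String.ext_iff, hp]
  simp only [String.toList_ofList, List.cons.injEq, true_and]
  intro e; exact hw (by rw [e]; simp)

theorem pvGet_keyOne (s1 : List Char) (h : '/' ∉ s1) :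
    PySem.Dict.get? pvResourceMap (String.ofList ('/' :: s1)) =
      if s1 = "products".toList then some "product"
      else if s1 = "prices".toList then some "product"
      else if s1 = "analytics".toList then some "product"
      else if s1 = "listings".toList then some "listing"
      else if s1 = "discounts".toList then some "product"
      else if s1 = "forecasts".toList then some "product"
      else if s1 = "brands".toList then some "brand"
      else if s1 = "accounts".toList then some "account"
      else if s1 = "knowledge".toList then some "knowledge"
      else if s1 = "images".toList then some "image"
      else none := by
  by_cases h1 : s1 = "products".toList
  · subst h1; decide
  by_cases h2 : s1 = "prices".toList
  · subst h2; decide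
  by_cases h3 : s1 = "analytics".toList
  · subst h3; decide
  by_cases h4 : s1 = "listings".toList
  · subst h4; decide
  by_cases h5 : s1 = "discounts".toList
  · subst h5; decide
  by_cases h6 : s1 = "forecasts".toList
  · subst h6; decide
  by_cases h7 : s1 = "brands".toList
  · subst h7; decide
  by_cases h8 : s1 = "accounts".toList
  · subst h8; decide
  by_cases h9 : s1 = "knowledge".toList
  · subst h9; decide
  by_cases h10 : s1 = "images".toList
  · subst h10; decide
  rw [if_neg h1, if_neg h2, if_neg h3, if_neg h4, if_neg h5, if_neg h6, if_neg h7,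
    if_neg h8, if_neg h9, if_neg h10]
  rw [pvMap_mk]
  have n1 := pvKeyNe1 "/products" "products".toList s1 rfl h1
  have n2 := pvKeyNe1 "/prices" "prices".toList s1 rfl h2
  have n3 := pvKeyNe1 "/analytics" "analytics".toList s1 rfl h3
  have n4 := pvKeyNe1 "/listings" "listings".toList s1 rfl h4
  have n5 := pvKeyNe1 "/discounts" "discounts".toList s1 rfl h5
  have n6 := pvKeyNe1 "/forecasts" "forecasts".toList s1 rfl h6
  have n7 := pvKeyNe1 "/brands" "brands".toList s1 rfl h7
  have n8 := pvKeyNe1 "/accounts" "accounts".toList s1 rfl h8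
  have n9 := pvKeyNe1 "/knowledge" "knowledge".toList s1 rfl h9
  have n10 := pvKeyNe1 "/images" "images".toList s1 rfl h10
  have n11 := pvKeyNe2 "/automations/annotation" "automations".toList "annotation".toList s1 rfl h
  have n12 := pvKeyNe2 "/automations/pricing" "automations".toList "pricing".toList s1 rfl h
  simp [n1, n2, n3, n4, n5, n6, n7, n8, n9, n10, n11, n12, PySem.Dict.get?]

theorem pvGet_keyTwo (s1 s2 : List Char) (h : '/' ∉ s1) :
    PySem.Dict.get? pvResourceMap (String.ofList ('/' :: (s1 ++ '/' :: s2))) =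
      if s1 = "automations".toList ∧ s2 = "annotation".toList then some "annotation"
      else if s1 = "automations".toList ∧ s2 = "pricing".toList then some "pricing"
      else none := by
  by_cases hA : s1 = "automations".toList ∧ s2 = "annotation".toList
  · obtain ⟨e1, e2⟩ := hA; subst e1; subst e2; decide
  by_cases hB : s1 = "automations".toList ∧ s2 = "pricing".toList
  · obtain ⟨e1, e2⟩ := hB; subst e1; subst e2
    rw [if_neg (by decide), if_pos ⟨rfl, rfl⟩]; decide
  rw [if_neg hA, if_neg hB]
  have hann : ¬ (("/automations/annotation" : String) = String.ofList ('/' :: (s1 ++ '/' :: s2))) := by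
    simp only [String.ext_iff]
    simp only [String.toList_ofList]
    intro e
    have e' : ("automations".toList : List Char) ++ '/' :: "annotation".toList = s1 ++ '/' :: s2 := by
      have : ("/automations/annotation" : String).toList = '/' :: ("automations".toList ++ '/' :: "annotation".toList) := rfl
      rw [this] at e
      exact (List.cons.injEq _ _ _ _ ▸ e :
        ('/' = '/' ∧ ("automations".toList : List Char) ++ '/' :: "annotation".toList = s1 ++ '/' :: s2)).2
    obtain ⟨e1, e2⟩ := (pvSlashSplit _ _ _ _ (by decide) h).mp e'
    exact hA ⟨e1.symm, e2.symm⟩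
  have hpr : ¬ (("/automations/pricing" : String) = String.ofList ('/' :: (s1 ++ '/' :: s2))) := by
    simp only [String.ext_iff]
    simp only [String.toList_ofList]
    intro e
    have e' : ("automations".toList : List Char) ++ '/' :: "pricing".toList = s1 ++ '/' :: s2 := by
      have : ("/automations/pricing" : String).toList = '/' :: ("automations".toList ++ '/' :: "pricing".toList) := rfl
      rw [this] at e
      exact (List.cons.injEq _ _ _ _ ▸ e :
        ('/' = '/' ∧ ("automations".toList : List Char) ++ '/' :: "pricing".toList = s1 ++ '/' :: s2)).2
    obtain ⟨e1, e2⟩ := (pvSlashSplit _ _ _ _ (by decide) h).mp e'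
    exact hB ⟨e1.symm, e2.symm⟩
  rw [pvMap_mk]
  have m1 := pvKeyNe3 "/products" "products".toList rfl (by decide) s1 s2
  have m2 := pvKeyNe3 "/prices" "prices".toList rfl (by decide) s1 s2
  have m3 := pvKeyNe3 "/analytics" "analytics".toList rfl (by decide) s1 s2
  have m4 := pvKeyNe3 "/listings" "listings".toList rfl (by decide) s1 s2
  have m5 := pvKeyNe3 "/discounts" "discounts".toList rfl (by decide) s1 s2
  have m6 := pvKeyNe3 "/forecasts" "forecasts".toList rfl (by decide) s1 s2
  have m7 := pvKeyNe3 "/brands" "brands".toList rfl (by decide) s1 s2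
  have m8 := pvKeyNe3 "/accounts" "accounts".toList rfl (by decide) s1 s2
  have m9 := pvKeyNe3 "/knowledge" "knowledge".toList rfl (by decide) s1 s2
  have m10 := pvKeyNe3 "/images" "images".toList rfl (by decide) s1 s2
  simp [m1, m2, m3, m4, m5, m6, m7, m8, m9, m10, hann, hpr, PySem.Dict.get?]

theorem pvKey1 (a : List Char) :
    PySem.Str.join "" ["/", String.ofList a] = String.ofList ('/' :: a) := by
  rw [String.ext_iff]
  simp [PySem.Str.toList_join, PySem.Chars.join, List.intercalate]

theorem pvKey2 (a b : List Char) :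
    PySem.Str.join "" ["/", String.ofList a, "/", String.ofList b] =
      String.ofList ('/' :: (a ++ '/' :: b)) := by
  rw [String.ext_iff]
  simp [PySem.Str.toList_join, PySem.Chars.join, List.intercalate]

theorem pvSplit_head (l : List Char) : ∃ r, pvSplit l = pvSeg l :: r := by
  rw [pvSplit]
  by_cases h : '/' ∈ l
  · rw [dif_pos h]; exact ⟨_, rfl⟩
  · rw [dif_neg h]
    refine ⟨[], ?_⟩
    have : pvSeg l = l := List.takeWhile_eq_self_iff.mpr (by
      intro x hx
      simp only [bne_iff_ne, ne_eq]
      intro e; exact h (e ▸ hx))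
    rw [this]

theorem pvChains (s1 : List Char) (h : '/' ∉ s1) :
    (if s1 = "analytics".toList then some "product"
     else if s1 = "discounts".toList then some "product"
     else if s1 = "forecasts".toList then some "product"
     else if s1 = "knowledge".toList then some "knowledge"
     else if s1 = "products".toList then some "product"
     else if s1 = "listings".toList then some "listing"
     else if s1 = "accounts".toList then some "account"
     else if s1 = "prices".toList then some "product"
     else if s1 = "brands".toList then some "brand"
     else if s1 = "images".toList then some "image"
     else (none : Option String))
    = PySem.Dict.get? pvResourceMap (String.ofList ('/' :: s1)) := by
  by_cases h1 : s1 = "products".toList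
  · subst h1; decide
  by_cases h2 : s1 = "prices".toList
  · subst h2; decide
  by_cases h3 : s1 = "analytics".toList
  · subst h3; decide
  by_cases h4 : s1 = "listings".toList
  · subst h4; decide
  by_cases h5 : s1 = "discounts".toList
  · subst h5; decide
  by_cases h6 : s1 = "forecasts".toList
  · subst h6; decide
  by_cases h7 : s1 = "brands".toList
  · subst h7; decide
  by_cases h8 : s1 = "accounts".toList
  · subst h8; decide
  by_cases h9 : s1 = "knowledge".toList
  · subst h9; decide
  by_cases h10 : s1 = "images".toList
  · subst h10; decide
  rw [pvGet_keyOne s1 h]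
  simp_all

theorem pvMain (n : String) (t : List Char) (hn : n.toList = '/' :: t) :
    pvDetectLoop n pvSortedPrefixes =
      (let segs : List String := (PySem.Chars.splitOn n.toList ['/']).map String.ofList
       let s1 := segs.getD 1 ""
       let hit := if 3 ≤ segs.length then
           PySem.Dict.get? pvResourceMap (PySem.Str.join "" ["/", s1, "/", segs.getD 2 ""])
         else none
       match hit with
       | some r => some r
       | none => PySem.Dict.get? pvResourceMap (PySem.Str.join "" ["/", s1])) := by
  have hpref : pvSortedPrefixes = ["/automations/annotation", "/automations/pricing",
    "/analytics", "/discounts", "/forecasts", "/knowledge", "/products", "/listings",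
    "/accounts", "/prices", "/brands", "/images"] := by decide
  have c1 := pvCondA_iff n "/automations/annotation" t
    ("automations".toList ++ '/' :: "annotation".toList) hn rfl
  rw [pvCond_two _ _ _ (by decide), pvCond_one _ _ (by decide)] at c1
  have c2 := pvCondA_iff n "/automations/pricing" t
    ("automations".toList ++ '/' :: "pricing".toList) hn rfl
  rw [pvCond_two _ _ _ (by decide), pvCond_one _ _ (by decide)] at c2
  have c3 := pvCondA_iff n "/analytics" t "analytics".toList hn rfl
  rw [pvCond_one _ _ (by decide)] at c3
  have c4 := pvCondA_iff n "/discounts" t "discounts".toList hn rfl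
  rw [pvCond_one _ _ (by decide)] at c4
  have c5 := pvCondA_iff n "/forecasts" t "forecasts".toList hn rfl
  rw [pvCond_one _ _ (by decide)] at c5
  have c6 := pvCondA_iff n "/knowledge" t "knowledge".toList hn rfl
  rw [pvCond_one _ _ (by decide)] at c6
  have c7 := pvCondA_iff n "/products" t "products".toList hn rfl
  rw [pvCond_one _ _ (by decide)] at c7
  have c8 := pvCondA_iff n "/listings" t "listings".toList hn rfl
  rw [pvCond_one _ _ (by decide)] at c8
  have c9 := pvCondA_iff n "/accounts" t "accounts".toList hn rfl
  rw [pvCond_one _ _ (by decide)] at c9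
  have c10 := pvCondA_iff n "/prices" t "prices".toList hn rfl
  rw [pvCond_one _ _ (by decide)] at c10
  have c11 := pvCondA_iff n "/brands" t "brands".toList hn rfl
  rw [pvCond_one _ _ (by decide)] at c11
  have c12 := pvCondA_iff n "/images" t "images".toList hn rfl
  rw [pvCond_one _ _ (by decide)] at c12
  have g1 : PySem.Dict.get? pvResourceMap "/automations/annotation" = some "annotation" := by decide
  have g2 : PySem.Dict.get? pvResourceMap "/automations/pricing" = some "pricing" := by decide
  have g3 : PySem.Dict.get? pvResourceMap "/analytics" = some "product" := by decide
  have g4 : PySem.Dict.get? pvResourceMap "/discounts" = some "product" := by decide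
  have g5 : PySem.Dict.get? pvResourceMap "/forecasts" = some "product" := by decide
  have g6 : PySem.Dict.get? pvResourceMap "/knowledge" = some "knowledge" := by decide
  have g7 : PySem.Dict.get? pvResourceMap "/products" = some "product" := by decide
  have g8 : PySem.Dict.get? pvResourceMap "/listings" = some "listing" := by decide
  have g9 : PySem.Dict.get? pvResourceMap "/accounts" = some "account" := by decide
  have g10 : PySem.Dict.get? pvResourceMap "/prices" = some "product" := by decide
  have g11 : PySem.Dict.get? pvResourceMap "/brands" = some "brand" := by decide
  have g12 : PySem.Dict.get? pvResourceMap "/images" = some "image" := by decide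
  rw [hpref]
  simp only [pvDetectLoop, c1, c2, c3, c4, c5, c6, c7, c8, c9, c10, c11, c12,
    g1, g2, g3, g4, g5, g6, g7, g8, g9, g10, g11, g12]
  rw [hn, pvSplitOn_eq]
  have hsp0 : pvSplit ('/' :: t) = [] :: pvSplit t := by
    simpa using pvSplit_cons [] t (by simp)
  rw [hsp0]
  by_cases hs : '/' ∈ t
  · have hsp1 : pvSplit t = pvSeg t :: pvSplit (pvAfter t) := by rw [pvSplit, dif_pos hs]
    obtain ⟨r2, hsp2⟩ := pvSplit_head (pvAfter t)
    rw [hsp1, hsp2]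
    simp only [List.map_cons, List.getD_cons_succ, List.getD_cons_zero, List.length_cons,
      List.length_map]
    rw [if_pos (show 3 ≤ r2.length + 1 + 1 + 1 by omega)]
    rw [pvKey2, pvGet_keyTwo _ _ (pvSeg_no_slash t)]
    by_cases hA : pvSeg t = "automations".toList ∧ pvSeg (pvAfter t) = "annotation".toList
    · rw [if_pos (show pvSeg t = "automations".toList ∧ '/' ∈ t ∧
          pvSeg (pvAfter t) = "annotation".toList from ⟨hA.1, hs, hA.2⟩), if_pos hA]
    · rw [if_neg (show ¬ (pvSeg t = "automations".toList ∧ '/' ∈ t ∧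
          pvSeg (pvAfter t) = "annotation".toList) from fun hh => hA ⟨hh.1, hh.2.2⟩), if_neg hA]
      by_cases hB : pvSeg t = "automations".toList ∧ pvSeg (pvAfter t) = "pricing".toList
      · rw [if_pos (show pvSeg t = "automations".toList ∧ '/' ∈ t ∧
            pvSeg (pvAfter t) = "pricing".toList from ⟨hB.1, hs, hB.2⟩), if_pos hB]
      · rw [if_neg (show ¬ (pvSeg t = "automations".toList ∧ '/' ∈ t ∧
            pvSeg (pvAfter t) = "pricing".toList) from fun hh => hB ⟨hh.1, hh.2.2⟩), if_neg hB]
        rw [pvKey1, ← pvChains (pvSeg t) (pvSeg_no_slash t)]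
  · have hsp1 : pvSplit t = [t] := pvSplit_clean t hs
    rw [hsp1]
    simp only [List.map_cons, List.map_nil, List.getD_cons_succ, List.getD_cons_zero,
      List.length_cons, List.length_nil]
    rw [if_neg (show ¬ (3 ≤ 0 + 1 + 1) by omega)]
    have hseg : pvSeg t = t := List.takeWhile_eq_self_iff.mpr (by
      intro x hx
      simp only [bne_iff_ne, ne_eq]
      intro e; exact hs (e ▸ hx))
    rw [if_neg (show ¬ (pvSeg t = "automations".toList ∧ '/' ∈ t ∧
        pvSeg (pvAfter t) = "annotation".toList) from fun hh => hs hh.2.1)]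
    rw [if_neg (show ¬ (pvSeg t = "automations".toList ∧ '/' ∈ t ∧
        pvSeg (pvAfter t) = "pricing".toList) from fun hh => hs hh.2.1)]
    rw [pvKey1, ← pvChains t hs, hseg]

theorem pvPorts_eq (path : String) :
    detect_resource_type_from_path path = detect_resource_type_from_path_alt path := by
  unfold detect_resource_type_from_path detect_resource_type_from_path_alt
  by_cases hp : path = ""
  · simp [hp]
  rw [if_neg hp, if_neg hp]
  have hex : ∃ t, (if PySem.Str.startswith path "/" then path
      else PySem.Str.join "" ["/", path]).toList = '/' :: t := by
    by_cases hsw : PySem.Str.startswith path "/" = true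
    · rw [if_pos hsw]
      rw [PySem.Str.startswith] at hsw
      obtain ⟨r, hr⟩ := (PySem.Chars.startswith_iff (s := path.toList) (p := "/".toList)).mp hsw
      exact ⟨r, by rw [← hr]; rfl⟩
    · rw [if_neg hsw]
      exact ⟨path.toList, by simp [PySem.Str.toList_join, PySem.Chars.join, List.intercalate]⟩
  obtain ⟨t, ht⟩ := hex
  exact pvMain _ t ht

-- ===== VERDICT (by name: the statement is the Claim_ definition above) =====
theorem detect_resource_type_from_path_spec : Claim_equal_detect_resource_type_from_path := by
  intro path _
  unfold Spec_detect_resource_type_from_path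
  exact pvPorts_eq path
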